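-- pv_equiv track=rewrite | github.com/kineticman/LivebarnScrape | generate_xmltv.py | group_events_by_surface
-- ===== SOURCE A (Python) =====
-- from typing import List, Dict, Tuple, Optional
--
-- CHILLER_TO_LIVEBARN = {
--     "1": 864,   # Dublin 1
--     "2": 865,   # Dublin 2
--     "5": 867,   # Easton 1
--     "6": 866,   # Easton 2
--     "8": 868,   # North 1
--     "9": 869,   # North 2
--     "13": 872,  # Ice Haus
--     "14": 871,  # Ice Works
--     "16": 873,  # Springfield
--     "24": 870,  # North 3
-- }
--
-- def group_events_by_surface(events: List[Dict[str, str]]) -> Dict[int, List[Dict[str, str]]]: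
--     """Group Chiller events by LiveBarn surface_id"""
--     grouped: Dict[int, List[Dict[str, str]]] = {}
--
--     for event in events:
--         product_id = event.get("productid", "")
--         surface_id = CHILLER_TO_LIVEBARN.get(product_id)
--
--         if surface_id:
--             if surface_id not in grouped:
--                 grouped[surface_id] = []
--             grouped[surface_id].append(event)
--
--     # Sort events by start time for each surface
--     for surface_id in grouped:
--         grouped[surface_id].sort(key=lambda e: e.get("start_date", ""))
--
--     return grouped
-- ===== SOURCE B (Python) =====
-- from typing import List, Dict
--
-- CHILLER_TO_LIVEBARN = {
--     "1": 864,
--     "2": 865,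
--     "5": 867,
--     "6": 866,
--     "8": 868,
--     "9": 869,
--     "13": 872,
--     "14": 871,
--     "16": 873,
--     "24": 870,
-- }
--
-- def group_events_by_surface(events: List[Dict[str, str]]) -> Dict[int, List[Dict[str, str]]]:
--     """Group Chiller events by LiveBarn surface_id (comprehension decomposition)."""
--     sids = [CHILLER_TO_LIVEBARN.get(e.get("productid", "")) for e in events]
--     keys = list(dict.fromkeys(s for s in sids if s))
--     return {k: sorted((e for s, e in zip(sids, events) if s == k),
--                       key=lambda e: e.get("start_date", ""))
--             for k in keys}
-- ===== Notes on version B (the rewrite author's own statement) =====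
-- stated objective: simpler
-- what changed: Replaces the dict-mutation loop (conditional key creation, in-place append, then a second loop sorting each bucket in place) by a declarative three-liner: map events to surface ids once, dedup the truthy ids for key order, and build the result dict in one comprehension whose buckets are filtered-and-sorted directly.
import Mathlib
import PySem

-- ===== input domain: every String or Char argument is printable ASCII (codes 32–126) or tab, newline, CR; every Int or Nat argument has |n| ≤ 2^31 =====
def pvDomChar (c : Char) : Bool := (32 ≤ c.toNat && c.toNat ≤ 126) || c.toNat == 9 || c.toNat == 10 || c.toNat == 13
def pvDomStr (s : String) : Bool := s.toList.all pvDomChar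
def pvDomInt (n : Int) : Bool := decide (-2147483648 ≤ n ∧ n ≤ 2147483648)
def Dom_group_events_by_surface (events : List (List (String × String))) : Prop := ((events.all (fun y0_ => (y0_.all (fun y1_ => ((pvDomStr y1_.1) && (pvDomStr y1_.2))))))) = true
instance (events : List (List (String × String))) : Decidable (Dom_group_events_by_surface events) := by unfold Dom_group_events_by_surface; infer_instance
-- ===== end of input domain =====

-- B replaces A's dict-mutation loop plus per-bucket in-place sorts by a declarative
-- decomposition (map to surface ids, dedup for key order, one comprehension filtering and
-- sorting each bucket); objective: simpler, same observable result.


-- module constant CHILLER_TO_LIVEBARN (shared by both ports, as in the Python module)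
def pvChiller : PySem.Dict String Int := PySem.Dict.ofList
  [("1", 864), ("2", 865), ("5", 867), ("6", 866), ("8", 868),
   ("9", 869), ("13", 872), ("14", 871), ("16", 873), ("24", 870)]

-- key=lambda e: e.get("start_date", "")  (shared by both ports)
def pvStartKey (e : List (String × String)) : String := (PySem.Dict.mk e).getD "start_date" ""

-- ===== PORT A =====
-- literal port: fold building the dict (event.get, CHILLER.get, truthiness test on the
-- Optional[int], conditional key creation, in-place append), then the second loop sorting
-- each bucket in place (an in-place sort per key = map over the items list).
def group_events_by_surface (events : List (List (String × String))) : List (Int × List (List (String × String))) :=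
  let grouped : PySem.Dict Int (List (List (String × String))) :=
    events.foldl (fun grouped event =>
      let product_id := (PySem.Dict.mk event).getD "productid" ""
      let surface_id := pvChiller.get? product_id
      match surface_id with
      | some sid =>
          if sid ≠ 0 then
            (if grouped.contains sid then grouped else grouped.insert sid []).modify sid []
              (fun l => l ++ [event])
          else grouped
      | none => grouped) PySem.Dict.empty
  grouped.items.map (fun p => (p.1, PySem.List.sorted p.2 pvStartKey false))

-- ===== PORT B =====
def pvRawSid (e : List (String × String)) : Option Int :=
  pvChiller.get? ((PySem.Dict.mk e).getD "productid" "")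

def group_events_by_surface_alt (events : List (List (String × String))) : List (Int × List (List (String × String))) :=
  let sids := events.map pvRawSid
  let keys := PySem.List.dedup (sids.filterMap (fun s =>
    match s with
    | some v => if v ≠ 0 then some v else none
    | none => none))
  keys.map (fun k =>
    (k, PySem.List.sorted (((sids.zip events).filter (fun p => p.1 == some k)).map (·.2)) pvStartKey false))

-- ===== PRECONDITION & SPEC =====
def Spec_group_events_by_surface (events : List (List (String × String))) (out : List (Int × List (List (String × String)))) : Prop := out = group_events_by_surface_alt events
instance (events : List (List (String × String))) (out : List (Int × List (List (String × String)))) : Decidable (Spec_group_events_by_surface events out) := by unfold Spec_group_events_by_surface; infer_instance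

-- ===== CLAIM (what is proved, stated in full; the proofs are below) =====
def Claim_equal_group_events_by_surface : Prop := ∀ (events : List (List (String × String))), Dom_group_events_by_surface events → Spec_group_events_by_surface events (group_events_by_surface events)

-- ===== LEMMAS AND PROOFS =====

-- the effective tag of an event: its surface id when mapped and truthy, else none
def pvTag (e : List (String × String)) : Option Int :=
  match pvRawSid e with
  | some v => if v ≠ 0 then some v else none
  | none => none

-- events paired with their effective tag, untagged events dropped
def pvTagged (events : List (List (String × String))) : List (Int × List (String × String)) :=
  events.filterMap (fun e => (pvTag e).map (fun k => (k, e)))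

-- creating the missing key first and then modifying it is the same one modify
theorem pvModify_insert {α : Type} (g : PySem.Dict Int (List α)) (v : Int) (e : α)
    (hc : ¬ g.contains v = true) :
    (g.insert v []).modify v [] (fun l => l ++ [e]) = g.modify v [] (fun l => l ++ [e]) := by
  have hnm : ∀ p ∈ g.items, ¬ p.1 = v := by
    intro p hp hpe
    exact hc ((PySem.Dict.contains_iff_mem_keys g v).mpr (hpe ▸ PySem.Dict.mem_keys_of_mem_items g hp))
  have hcf : g.contains v = false := by simpa using hc
  have hins : ({ items := g.items ++ [(v, ([] : List α))] } : PySem.Dict Int (List α)).getD v [] = [] := by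
    have := PySem.Dict.getD_insert_self g v ([] : List α) ([] : List α)
    simpa [PySem.Dict.insert, hcf] using this
  apply PySem.Dict.ext
  simp [PySem.Dict.modify, PySem.Dict.insert, hcf, hins,
        PySem.Dict.getD_of_not_contains g ([] : List α) hcf]
  have hmap : List.map (fun p => if p.1 = v then (v, [e]) else p) g.items = List.map id g.items :=
    List.map_congr_left (fun p hp => by simp [hnm p hp])
  simpa using hmap

-- A's per-event step collapses to a single modify on the tagged pair
theorem pvStep_eq (g : PySem.Dict Int (List (List (String × String)))) (e : List (String × String)) :
    (let product_id := (PySem.Dict.mk e).getD "productid" ""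
     let surface_id := pvChiller.get? product_id
     match surface_id with
     | some sid =>
         if sid ≠ 0 then
           (if g.contains sid then g else g.insert sid []).modify sid [] (fun l => l ++ [e])
         else g
     | none => g)
    = match pvTag e with
      | some k => g.modify k [] (fun l => l ++ [e])
      | none => g := by
  simp only [pvTag, pvRawSid]
  cases pvChiller.get? ((PySem.Dict.mk e).getD "productid" "") with
  | none => rfl
  | some v =>
      by_cases hv : v = 0
      · simp [hv]
      · simp only [ne_eq, hv, not_false_eq_true, if_true]
        by_cases hc : g.contains v = true
        · rw [if_pos hc]
        · rw [if_neg hc]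
          exact pvModify_insert g v e hc

-- A's whole fold equals the canonical modify-fold over the tagged pairs
theorem pvFold_eq (events : List (List (String × String))) :
    ∀ g : PySem.Dict Int (List (List (String × String))),
    events.foldl (fun grouped event =>
      let product_id := (PySem.Dict.mk event).getD "productid" ""
      let surface_id := pvChiller.get? product_id
      match surface_id with
      | some sid =>
          if sid ≠ 0 then
            (if grouped.contains sid then grouped else grouped.insert sid []).modify sid []
              (fun l => l ++ [event])
          else grouped
      | none => grouped) g
    = (pvTagged events).foldl (fun d p => d.modify p.1 [] (fun x => x ++ [p.2])) g := by
  induction events with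
  | nil => intro g; rfl
  | cons e es ih =>
      intro g
      simp only [List.foldl_cons, pvTagged, List.filterMap_cons]
      rw [pvStep_eq g e]
      cases h : pvTag e with
      | none => simpa [pvTagged] using ih g
      | some k => simpa [pvTagged] using ih (g.modify k [] (fun l => l ++ [e]))

-- the tagged keys, in order, are exactly the filterMapped tags
theorem pvTagged_map_fst (events : List (List (String × String))) :
    (pvTagged events).map (·.1) = events.filterMap pvTag := by
  induction events with
  | nil => rfl
  | cons e es ih =>
      cases h : pvTag e <;> simp [pvTagged, h] <;>
        simpa [pvTagged] using ih

-- every key B (and A) produces is nonzero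
theorem pvTag_ne_zero (e : List (String × String)) (k : Int) (h : pvTag e = some k) : k ≠ 0 := by
  unfold pvTag at h
  cases hr : pvRawSid e with
  | none => rw [hr] at h; simp at h
  | some v =>
      rw [hr] at h
      by_cases hv : v = 0
      · simp [hv] at h
      · simp [hv] at h
        omega

-- bucket equality: A's grouped contents (original order) = B's zip-filter, for nonzero k
theorem pvBucket_eq (k : Int) (hk : k ≠ 0) (events : List (List (String × String))) :
    ((pvTagged events).filter (fun p => p.1 == k)).map (·.2)
    = (((events.map pvRawSid).zip events).filter (fun p => p.1 == some k)).map (·.2) := by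
  induction events with
  | nil => rfl
  | cons e es ih =>
      simp only [pvTagged, List.filterMap_cons, List.map_cons, List.zip_cons_cons]
      cases h : pvRawSid e with
      | none =>
          have ht : pvTag e = none := by simp [pvTag, h]
          simp only [ht, Option.map_none, List.filter_cons]
          simpa [pvTagged] using ih
      | some v =>
          by_cases hv : v = 0
          · have ht : pvTag e = none := by simp [pvTag, h, hv]
            subst hv
            have hne : ((some (0 : Int) == some k)) = false := by simp [Ne.symm hk]
            simp only [ht, Option.map_none, List.filter_cons, hne]
            simpa [pvTagged] using ih
          · have ht : pvTag e = some v := by simp [pvTag, h, hv]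
            simp only [ht, Option.map_some, List.filter_cons]
            by_cases hvk : v = k
            · subst hvk
              simp only [beq_self_eq_true, if_true, List.map_cons]
              exact congrArg (List.cons e) ih
            · have h1 : ((v == k)) = false := by simp [hvk]
              have h2 : ((some v == some k)) = false := by simp [hvk]
              simp only [h1, h2, Bool.false_eq_true, if_false]
              simpa [pvTagged] using ih

-- ===== VERDICT (by name: the statement is the Claim_ definition above) =====
theorem group_events_by_surface_spec : Claim_equal_group_events_by_surface := by
  intro events _
  unfold Spec_group_events_by_surface group_events_by_surface group_events_by_surface_alt
  rw [pvFold_eq]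
  show (List.foldl (fun d p => d.modify p.1 [] (fun x => x ++ [p.2])) PySem.Dict.empty
          (pvTagged events)).items.map (fun p => (p.1, PySem.List.sorted p.2 pvStartKey false))
     = (PySem.List.dedup ((events.map pvRawSid).filterMap (fun s =>
          match s with
          | some v => if v ≠ 0 then some v else none
          | none => none))).map (fun k =>
          (k, PySem.List.sorted ((((events.map pvRawSid).zip events).filter
                (fun p => p.1 == some k)).map (·.2)) pvStartKey false))
  have hnodup : ((pvTagged events).foldl (fun d p => d.modify p.1 [] (fun x => x ++ [p.2]))
      PySem.Dict.empty).keys.Nodup :=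
    PySem.Dict.nodup_keys_foldl_modify_key (pvTagged events) (·.1) []
      (fun _ p => fun x => x ++ [p.2]) PySem.Dict.empty PySem.Dict.nodup_keys_empty
  rw [PySem.Dict.items_eq_map_keys _ hnodup []]
  rw [PySem.Dict.keys_foldl_modify_key (pvTagged events) (·.1) []
      (fun _ p => fun x => x ++ [p.2]) PySem.Dict.empty]
  have hfun : ((fun s =>
      match s with
      | some v => if v ≠ 0 then some v else none
      | none => none) ∘ pvRawSid) = pvTag := rfl
  have hkeys : PySem.Set.update (PySem.Dict.empty : PySem.Dict Int (List (List (String × String)))).keys ((pvTagged events).map (·.1))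
      = PySem.List.dedup ((events.map pvRawSid).filterMap (fun s =>
          match s with
          | some v => if v ≠ 0 then some v else none
          | none => none)) := by
    rw [pvTagged_map_fst, PySem.List.dedup_eq_ofList, List.filterMap_map, hfun]
    rfl
  rw [List.map_map, hkeys]
  apply List.map_congr_left
  intro k hkmem
  have hk : k ≠ 0 := by
    rw [PySem.List.dedup_eq_ofList, PySem.Set.mem_ofList, List.filterMap_map, hfun] at hkmem
    obtain ⟨e, _, hs⟩ := List.mem_filterMap.mp hkmem
    exact pvTag_ne_zero e k hs
  simp only [Function.comp]
  rw [PySem.Dict.getD_foldl_modify_append (pvTagged events) PySem.Dict.empty k,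
      pvBucket_eq k hk events]
  simp [PySem.Dict.getD_empty]
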